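-- pv_equiv track=rewrite | github.com/ryandscholtz/StockAnalysis | backend/app/api/routes.py | _format_api_attempts_comment
-- ===== SOURCE A (Python) =====
-- def _format_api_attempts_comment(api_attempts: list, success: bool = False) -> str:
--     """Format API attempts into a detailed comment for the frontend"""
--     if not api_attempts:
--         return "No API attempt details available"
--
--     if success:
--         # For successful requests, show what worked
--         successful_attempts = [attempt for attempt in api_attempts if attempt.get('status') == 'success']
--         if successful_attempts:
--             methods = [attempt.get('method', 'Unknown method') for attempt in successful_attempts]
--             return f"✅ Success using: {', '.join(methods)}"
--         else:
--             return "✅ Success (method details unavailable)"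
--     else:
--         # For failed requests, show detailed breakdown of what was tried
--         comment_parts = []
--
--         # Group attempts by API
--         api_groups = {}
--         for attempt in api_attempts:
--             api_name = attempt.get('api', 'Unknown API')
--             if api_name not in api_groups:
--                 api_groups[api_name] = []
--             api_groups[api_name].append(attempt)
--
--         for api_name, attempts in api_groups.items():
--             failed_attempts = [a for a in attempts if a.get('status') == 'failed']
--             if failed_attempts:
--                 errors = []
--                 for attempt in failed_attempts:
--                     method = attempt.get('method', 'unknown')
--                     error = attempt.get('error', 'unknown error')
--                     errors.append(f"{method}: {error}")
--
--                 comment_parts.append(f"❌ {api_name} - {'; '.join(errors)}")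
--
--         if comment_parts:
--             return " | ".join(comment_parts)
--         else:
--             return "❌ All API methods failed (no details available)"
-- ===== SOURCE B (Python) =====
-- def _format_api_attempts_comment(api_attempts: list, success: bool = False) -> str:
--     """Format API attempts into a detailed comment for the frontend"""
--     if not api_attempts:
--         return "No API attempt details available"
--
--     if success:
--         methods = _success_methods(api_attempts)
--         if methods:
--             return "\u2705 Success using: " + ", ".join(methods)
--         return "\u2705 Success (method details unavailable)"
--
--     parts = _failed_parts(api_attempts)
--     if parts:
--         return " | ".join(parts)
--     return "\u274c All API methods failed (no details available)"
--
--
-- def _success_methods(attempts):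
--     if not attempts:
--         return []
--     tail = _success_methods(attempts[1:])
--     if attempts[0].get('status') == 'success':
--         return [attempts[0].get('method', 'Unknown method')] + tail
--     return tail
--
--
-- def _failed_parts(attempts):
--     # Recursive partitioning: the first attempt's api name heads the group;
--     # split attempts into that name's group and the rest, emit one part for the
--     # group's failed attempts (if any), recurse on the rest.  First-appearance
--     # order of api names is preserved by construction.
--     if not attempts:
--         return []
--     name = attempts[0].get('api', 'Unknown API')
--     mine = [a for a in attempts if a.get('api', 'Unknown API') == name]
--     rest = [a for a in attempts if a.get('api', 'Unknown API') != name]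
--     errors = ['%s: %s' % (a.get('method', 'unknown'), a.get('error', 'unknown error'))
--               for a in mine if a.get('status') == 'failed']
--     head = ['\u274c %s - %s' % (name, '; '.join(errors))] if errors else []
--     return head + _failed_parts(rest)
-- ===== Notes on version B (the rewrite author's own statement) =====
-- stated objective: alternative
-- what changed: The failed branch drops A's keyed grouping dict for a recursive partition: take the first attempt's api name, split the list into that name's group and the rest, emit one part for the group's failures, and recurse on the rest; the success branch is likewise a structural recursion instead of filter-then-map.
import Mathlib
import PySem

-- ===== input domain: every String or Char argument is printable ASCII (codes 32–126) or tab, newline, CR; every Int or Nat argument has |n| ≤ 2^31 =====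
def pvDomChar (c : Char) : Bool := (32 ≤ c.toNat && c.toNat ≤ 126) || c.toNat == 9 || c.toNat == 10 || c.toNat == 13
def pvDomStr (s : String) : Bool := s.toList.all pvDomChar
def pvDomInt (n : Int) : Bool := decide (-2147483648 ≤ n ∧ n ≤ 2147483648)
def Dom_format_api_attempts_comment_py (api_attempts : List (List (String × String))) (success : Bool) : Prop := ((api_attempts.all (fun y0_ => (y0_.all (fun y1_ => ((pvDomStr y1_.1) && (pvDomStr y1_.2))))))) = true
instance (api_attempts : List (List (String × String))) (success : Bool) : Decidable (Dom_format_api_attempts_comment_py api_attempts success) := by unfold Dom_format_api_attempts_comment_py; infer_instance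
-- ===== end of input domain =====

-- B replaces A's keyed grouping dict with a recursive partition by the first attempt's api name (alternative decomposition, same results).

-- attempt.get(k, d) / attempt.get(k): first-match lookup on the attempt's association list (Python dict semantics)
def pvAGet (a : List (String × String)) (k d : String) : String :=
  (PySem.Dict.mk a).getD k d

def pvAGet? (a : List (String × String)) (k : String) : Option String :=
  (PySem.Dict.mk a).get? k

-- ===== PORT A =====
def format_api_attempts_comment_py (api_attempts : List (List (String × String))) (success : Bool) : String :=
  if api_attempts.isEmpty then "No API attempt details available"
  else if success then
    let successful_attempts := api_attempts.filter (fun a => pvAGet? a "status" == some "success")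
    if !successful_attempts.isEmpty then
      let methods := successful_attempts.map (fun a => pvAGet a "method" "Unknown method")
      "✅ Success using: " ++ PySem.Str.join ", " methods
    else "✅ Success (method details unavailable)"
  else
    let api_groups : PySem.Dict String (List (List (String × String))) :=
      api_attempts.foldl (fun g a =>
        let api_name := pvAGet a "api" "Unknown API"
        let g := if g.contains api_name then g else g.insert api_name []
        g.insert api_name (g.getD api_name [] ++ [a])) PySem.Dict.empty
    let comment_parts := api_groups.items.foldl (fun ps p =>
      let failed_attempts := p.2.filter (fun a => pvAGet? a "status" == some "failed")
      if !failed_attempts.isEmpty then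
        let errors := failed_attempts.map (fun a =>
          pvAGet a "method" "unknown" ++ ": " ++ pvAGet a "error" "unknown error")
        ps ++ ["❌ " ++ p.1 ++ " - " ++ PySem.Str.join "; " errors]
      else ps) []
    if !comment_parts.isEmpty then PySem.Str.join " | " comment_parts
    else "❌ All API methods failed (no details available)"

-- ===== PORT B =====
-- recursive collection of the successful attempts' methods (Source B's _success_methods)
def pvSuccessMethods : List (List (String × String)) → List String
  | [] => []
  | a :: tl =>
    let tail := pvSuccessMethods tl
    if pvAGet? a "status" == some "success" then pvAGet a "method" "Unknown method" :: tail
    else tail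

-- recursive partition by the first attempt's api name (Source B's _failed_parts)
def pvFailedParts : List (List (String × String)) → List String
  | [] => []
  | a :: tl =>
    let name := pvAGet a "api" "Unknown API"
    let mine := (a :: tl).filter (fun b => pvAGet b "api" "Unknown API" == name)
    let rest := (a :: tl).filter (fun b => !(pvAGet b "api" "Unknown API" == name))
    let errors := (mine.filter (fun b => pvAGet? b "status" == some "failed")).map
      (fun b => pvAGet b "method" "unknown" ++ ": " ++ pvAGet b "error" "unknown error")
    (if errors.isEmpty then [] else ["❌ " ++ name ++ " - " ++ PySem.Str.join "; " errors])
      ++ pvFailedParts rest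
  termination_by xs => xs.length
  decreasing_by
    simp only [List.filter]
    simp only [beq_self_eq_true, Bool.not_true]
    exact Nat.lt_succ_of_le (List.length_filter_le _ _)

def format_api_attempts_comment_py_alt (api_attempts : List (List (String × String))) (success : Bool) : String :=
  if api_attempts.isEmpty then "No API attempt details available"
  else if success then
    let methods := pvSuccessMethods api_attempts
    if methods.isEmpty then "✅ Success (method details unavailable)"
    else "✅ Success using: " ++ PySem.Str.join ", " methods
  else
    let parts := pvFailedParts api_attempts
    if parts.isEmpty then "❌ All API methods failed (no details available)"
    else PySem.Str.join " | " parts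

-- ===== PRECONDITION & SPEC =====
def Spec_format_api_attempts_comment_py (api_attempts : List (List (String × String))) (success : Bool) (out : String) : Prop := out = format_api_attempts_comment_py_alt api_attempts success
instance (api_attempts : List (List (String × String))) (success : Bool) (out : String) : Decidable (Spec_format_api_attempts_comment_py api_attempts success out) := by unfold Spec_format_api_attempts_comment_py; infer_instance

-- ===== CLAIM (what is proved, stated in full; the proofs are below) =====
def Claim_equal_format_api_attempts_comment_py : Prop := ∀ (api_attempts : List (List (String × String))) (success : Bool), Dom_format_api_attempts_comment_py api_attempts success → Spec_format_api_attempts_comment_py api_attempts success (format_api_attempts_comment_py api_attempts success)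

-- ===== LEMMAS AND PROOFS =====

-- proof-side abbreviations
def pvNm (a : List (String × String)) : String := pvAGet a "api" "Unknown API"

def pvErrsOf (xs : List (List (String × String))) (n : String) : List String :=
  (xs.filter (fun b => pvNm b == n && pvAGet? b "status" == some "failed")).map
    (fun b => pvAGet b "method" "unknown" ++ ": " ++ pvAGet b "error" "unknown error")

def pvPartFn (xs : List (List (String × String))) (n : String) : List String :=
  if (pvErrsOf xs n).isEmpty then []
  else ["❌ " ++ n ++ " - " ++ PySem.Str.join "; " (pvErrsOf xs n)]

-- B's success recursion is filter-then-map
theorem successMethods_eq (xs : List (List (String × String))) :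
    pvSuccessMethods xs
      = (xs.filter (fun a => pvAGet? a "status" == some "success")).map
          (fun a => pvAGet a "method" "Unknown method") := by
  induction xs with
  | nil => rfl
  | cons a tl ih =>
    simp only [pvSuccessMethods, List.filter]
    by_cases h : (pvAGet? a "status" == some "success") = true
    · simp [h, ih]
    · simp [h, ih]
    
-- filtering commutes with set-of-list
theorem filter_add (p : String → Bool) (s : PySem.Set String) (x : String) :
    List.filter p (PySem.Set.add s x) = PySem.Set.add (List.filter p s) x ∨
    (p x = false ∧ List.filter p (PySem.Set.add s x) = List.filter p s) := by
  by_cases hp : p x = true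
  · left
    by_cases hm : x ∈ s
    · simp [PySem.Set.add, hm, List.mem_filter, hp]
    · simp [PySem.Set.add, hm, List.filter_append, List.filter, hp]
  · right
    refine ⟨by simpa using hp, ?_⟩
    by_cases hm : x ∈ s
    · simp [PySem.Set.add, hm]
    · simp [PySem.Set.add, hm, List.filter_append, List.filter, by simpa using hp]

theorem filter_foldl_add (p : String → Bool) (l : List String) (s : PySem.Set String) :
    List.filter p (l.foldl PySem.Set.add s) = (l.filter p).foldl PySem.Set.add (List.filter p s) := by
  induction l generalizing s with
  | nil => rfl
  | cons x l ih =>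
    simp only [List.foldl, List.filter]
    rcases filter_add p s x with h | ⟨hp, h⟩
    · have hp : p x = true := by
        by_contra hpf
        have hpf' : p x = false := by simpa using hpf
        rcases filter_add p s x with _ | _ <;> simp_all [PySem.Set.add]
        · by_cases hm : x ∈ s <;> simp_all [List.mem_filter]
      simp only [hp, List.foldl]
      rw [ih, h]
    · simp only [hp, Bool.false_eq_true, if_false]
      rw [ih, h]

theorem filter_ofList (p : String → Bool) (l : List String) :
    (PySem.Set.ofList l).filter p = PySem.Set.ofList (l.filter p) := by
  unfold PySem.Set.ofList
  rw [filter_foldl_add]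
  rfl

-- B's recursive partition computes, for each distinct api name in first-appearance
-- order, the part built from that name's failed attempts
theorem failedParts_eq (xs : List (List (String × String))) :
    pvFailedParts xs = (PySem.Set.ofList (xs.map pvNm)).flatMap (pvPartFn xs) := by
  induction hn : xs.length using Nat.strong_induction_on generalizing xs with
  | _ n ih =>
  cases xs with
  | nil => simp [pvFailedParts]
  | cons a tl =>
    set nm := pvAGet a "api" "Unknown API" with hnm
    have hnma : pvNm a = nm := hnm.symm
    have hrest : (a :: tl).filter (fun b => !(pvAGet b "api" "Unknown API" == nm))
        = tl.filter (fun b => !(pvAGet b "api" "Unknown API" == nm)) := by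
      have h : (pvAGet a "api" "Unknown API" == nm) = true := by rw [hnm]; exact beq_self_eq_true _
      simp [List.filter_cons, h]
    set rest := tl.filter (fun b => !(pvAGet b "api" "Unknown API" == nm)) with hrdef
    have hlen : rest.length < n := by
      rw [← hn]
      exact Nat.lt_succ_of_le (List.length_filter_le _ _)
    have hih := ih rest.length hlen rest rfl
    -- the distinct names of xs split as nm followed by the distinct names of rest
    have hnames : PySem.Set.ofList ((a :: tl).map pvNm)
        = nm :: PySem.Set.ofList (rest.map pvNm) := by
      rw [List.map_cons, PySem.Set.ofList_cons]
      congr 1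
      show (PySem.Set.ofList (tl.map pvNm)).discard (pvNm a) = _
      unfold PySem.Set.discard
      rw [hnma, filter_ofList, List.filter_map]
      rfl
    -- attempts of a name other than nm are untouched by removing nm's group
    have hsame : ∀ m, m ≠ nm → pvErrsOf rest m = pvErrsOf (a :: tl) m := by
      intro m hm
      unfold pvErrsOf
      congr 1
      have hQa : (pvNm a == m) = false :=
        beq_eq_false_iff_ne.mpr (by rw [hnma]; exact fun h => hm h.symm)
      have h1 : (a :: tl).filter (fun b => pvNm b == m && pvAGet? b "status" == some "failed")
          = tl.filter (fun b => pvNm b == m && pvAGet? b "status" == some "failed") := by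
        simp [List.filter_cons, hQa]
      rw [hrdef, List.filter_filter, h1]
      refine List.filter_congr (fun b _ => ?_)
      by_cases hb : (pvNm b == m) = true
      · have hbm : pvNm b = m := beq_iff_eq.mp hb
        have hbn : (pvAGet b "api" "Unknown API" == nm) = false :=
          beq_eq_false_iff_ne.mpr (by show pvNm b ≠ nm; rw [hbm]; exact hm)
        simp [hb, hbn]
      · have hb' : (pvNm b == m) = false := by simpa using hb
        simp [hb']
    -- unfold one step of the recursion
    rw [pvFailedParts]
    simp only [← hnm, hrest, ← hrdef]
    rw [hih, hnames, List.flatMap_cons]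
    congr 1
    · -- head part: Source B's 'mine'-then-'failed' double filter is pvErrsOf (a :: tl) nm
      have hswap : ((a :: tl).filter (fun b => pvAGet b "api" "Unknown API" == nm)).filter
            (fun b => pvAGet? b "status" == some "failed")
          = (a :: tl).filter (fun b => pvNm b == nm && pvAGet? b "status" == some "failed") := by
        rw [List.filter_filter]
        exact List.filter_congr (fun b _ => Bool.and_comm _ _)
      rw [hswap]
      rfl
    · -- recursive parts: pvPartFn rest agrees with pvPartFn (a :: tl) on rest's names
      unfold List.flatMap
      congr 1
      refine List.map_congr_left (fun m hmem => ?_)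
      have hm : m ∈ rest.map pvNm := (PySem.Set.mem_ofList _ _).mp hmem
      obtain ⟨b, hb, hbm⟩ := List.mem_map.mp hm
      have hbne : (pvAGet b "api" "Unknown API" == nm) = false := by
        have := List.of_mem_filter hb
        simpa using this
      have hmne : m ≠ nm := by
        intro h
        rw [← hbm] at h
        exact absurd (beq_eq_false_iff_ne.mp hbne) (by simpa [pvNm] using not_not_intro h)
      unfold pvPartFn
      rw [hsame m hmne]

-- A's contains-check-then-append grouping step is dict.modify with default []
theorem stepA_eq_modify (g : PySem.Dict String (List (List (String × String))))
    (n : String) (v : List (String × String)) :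
    (let g' := if g.contains n then g else g.insert n []
     g'.insert n (g'.getD n [] ++ [v]))
    = g.modify n [] (· ++ [v]) := by
  by_cases h : g.contains n
  · simp [h, PySem.Dict.modify]
  · have h' : g.contains n = false := by simpa using h
    simp [h', PySem.Dict.modify, PySem.Dict.insert_insert_self,
      PySem.Dict.getD_of_not_contains (h := h')]

-- the items of A's grouping dict: distinct api names in first-appearance order,
-- each paired with the sublist of attempts carrying that name
theorem groups_items (xs : List (List (String × String))) :
    (xs.foldl (fun g a => g.modify (pvNm a) [] (· ++ [a]))
      (PySem.Dict.empty : PySem.Dict String (List (List (String × String))))).items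
    = (PySem.Set.ofList (xs.map pvNm)).map
        (fun n => (n, xs.filter (fun a => pvNm a == n))) := by
  set G := xs.foldl (fun g a => g.modify (pvNm a) [] (· ++ [a]))
      (PySem.Dict.empty : PySem.Dict String (List (List (String × String)))) with hG
  have hkeys : G.keys = PySem.Set.ofList (xs.map pvNm) := by
    rw [hG, PySem.Dict.keys_foldl_modify_key]
    simp [PySem.Set.update_nil_left]
  have hnodup : G.keys.Nodup := by rw [hkeys]; exact PySem.Set.nodup_ofList _
  have hgetD : ∀ c, G.getD c [] = xs.filter (fun a => pvNm a == c) := by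
    intro c
    have : G = (xs.map (fun a => (pvNm a, a))).foldl
        (fun g p => g.modify p.1 [] (· ++ [p.2])) PySem.Dict.empty := by
      rw [hG, List.foldl_map]
    rw [this, PySem.Dict.getD_foldl_modify_append]
    simp [List.filter_map, Function.comp_def]
  rw [PySem.Dict.items_eq_map_keys G hnodup ([] : List (List (String × String))), hkeys]
  exact List.map_congr_left (fun n _ => by rw [hgetD])

theorem equiv_main (api_attempts : List (List (String × String))) (success : Bool) :
    format_api_attempts_comment_py api_attempts success
      = format_api_attempts_comment_py_alt api_attempts success := by
  unfold format_api_attempts_comment_py format_api_attempts_comment_py_alt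
  by_cases hemp : api_attempts.isEmpty
  · simp [hemp]
  · simp only [hemp, if_false, Bool.false_eq_true]
    cases success with
    | true =>
      simp only [if_true]
      rw [successMethods_eq]
      set succ := api_attempts.filter (fun a => pvAGet? a "status" == some "success") with hs
      by_cases h : succ.isEmpty
      · simp [h]
      · simp [h]
    | false =>
      simp only [Bool.false_eq_true, if_false]
      -- A's grouping fold is the modify fold
      have hfold : api_attempts.foldl (fun g a =>
          let api_name := pvAGet a "api" "Unknown API"
          let g := if g.contains api_name then g else g.insert api_name []
          g.insert api_name (g.getD api_name [] ++ [a]))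
          (PySem.Dict.empty : PySem.Dict String (List (List (String × String))))
        = api_attempts.foldl (fun g a => g.modify (pvNm a) [] (· ++ [a]))
          PySem.Dict.empty := by
        refine PySem.List.foldl_congr_mem _ _ _ _ (fun g a _ => ?_)
        exact stepA_eq_modify g (pvAGet a "api" "Unknown API") a
      rw [hfold, groups_items, List.foldl_map]
      -- A's per-name loop body appends exactly pvPartFn
      have hbody : ∀ (ps : List String) (n : String),
          (fun ps (p : String × List (List (String × String))) =>
            let failed_attempts := p.2.filter (fun a => pvAGet? a "status" == some "failed")
            if !failed_attempts.isEmpty then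
              let errors := failed_attempts.map (fun a =>
                pvAGet a "method" "unknown" ++ ": " ++ pvAGet a "error" "unknown error")
              ps ++ ["❌ " ++ p.1 ++ " - " ++ PySem.Str.join "; " errors]
            else ps) ps
            (n, api_attempts.filter (fun a => pvNm a == n))
          = ps ++ pvPartFn api_attempts n := by
        intro ps n
        have hff : (api_attempts.filter (fun a => pvNm a == n)).filter
              (fun a => pvAGet? a "status" == some "failed")
            = api_attempts.filter (fun a =>
              pvNm a == n && pvAGet? a "status" == some "failed") := by
          rw [List.filter_filter]
          exact List.filter_congr (fun a _ => Bool.and_comm _ _)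
        simp only [hff, pvPartFn, pvErrsOf, List.isEmpty_map, Bool.not_eq_true']
        by_cases h : (api_attempts.filter (fun a =>
            pvNm a == n && pvAGet? a "status" == some "failed")).isEmpty
        · simp [h]
        · simp [h]
      have hparts : (PySem.Set.ofList (api_attempts.map pvNm)).foldl (fun ps n =>
            (fun ps (p : String × List (List (String × String))) =>
              let failed_attempts := p.2.filter (fun a => pvAGet? a "status" == some "failed")
              if !failed_attempts.isEmpty then
                let errors := failed_attempts.map (fun a =>
                  pvAGet a "method" "unknown" ++ ": " ++ pvAGet a "error" "unknown error")
                ps ++ ["❌ " ++ p.1 ++ " - " ++ PySem.Str.join "; " errors]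
              else ps) ps
              (n, api_attempts.filter (fun a => pvNm a == n))) []
          = (PySem.Set.ofList (api_attempts.map pvNm)).flatMap (pvPartFn api_attempts) := by
        rw [PySem.List.foldl_congr_mem _ _ _ _ (fun ps n _ => hbody ps n)]
        simpa using PySem.List.foldl_append_eq_flatMap (pvPartFn api_attempts) _ []
      rw [hparts, ← failedParts_eq]
      by_cases h : (pvFailedParts api_attempts).isEmpty
      · simp [h]
      · simp [h]

-- ===== VERDICT (by name: the statement is the Claim_ definition above) =====
theorem format_api_attempts_comment_py_spec : Claim_equal_format_api_attempts_comment_py := by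
  intro xs s _
  show _ = _
  exact equiv_main xs s
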